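-- pv_equiv track=rewrite | github.com/Ziang-Liu/telegraph-2-Komga-format | telegraph-downloader/download_module.py | get_pictures_urls
-- ===== SOURCE A (Python) =====
-- def get_pictures_urls(text) -> str:
--     urls = []
--     start_tag = 'img src="'  # 图片URL的起始标签
--     end_quote = '"'  # 图片URL的结束标签
--     start = 0
--     while True:
--         start = text.find(start_tag, start)  # 查找图片URL的起始位置
--         if start == -1:  # 如果找不到起始标签，则结束循环
--             break
--         start += len(start_tag)  # 移动到起始标签之后
--         end = text.find(end_quote, start)  # 查找图片URL的结束位置
--         if end == -1:  # 如果找不到结束标签，则结束循环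
--             break
--         urls.append(text[start:end])  # 将找到的图片URL添加到列表中
--         start = end  # 移动到下一个起始位置
--
--     return urls
-- ===== SOURCE B (Python) =====
-- import re
--
-- _IMG_RE = re.compile(r'img src="([^"]*)"')
--
-- def get_pictures_urls(text) -> str:
--     return _IMG_RE.findall(text)
-- ===== Notes on version B (the rewrite author's own statement) =====
-- stated objective: idiomatic
-- what changed: The manual while-loop of repeated str.find calls, index arithmetic and slicing is replaced by a single precompiled regular expression whose findall extracts every captured URL in one scan.
import Mathlib
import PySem

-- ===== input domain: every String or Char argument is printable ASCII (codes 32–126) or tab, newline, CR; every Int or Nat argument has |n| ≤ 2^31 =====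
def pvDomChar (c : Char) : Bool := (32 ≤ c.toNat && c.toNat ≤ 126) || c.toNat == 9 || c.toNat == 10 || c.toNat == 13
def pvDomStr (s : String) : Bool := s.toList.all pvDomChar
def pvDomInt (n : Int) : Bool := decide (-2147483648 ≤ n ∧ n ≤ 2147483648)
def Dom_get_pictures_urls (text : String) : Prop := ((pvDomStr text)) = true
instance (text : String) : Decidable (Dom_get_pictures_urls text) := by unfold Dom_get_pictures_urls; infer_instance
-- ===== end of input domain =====

-- B replaces A's manual while-loop of repeated str.find/index arithmetic by one regex findall; return values proved equal.

-- ===== PORT A =====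
-- A's while-loop: find 'img src="', then the next '"', slice between, continue AT the quote.
-- The fuel only makes the loop total; each iteration moves start forward by at least 9,
-- so text.length + 1 iterations always suffice (proved as part of the equivalence).
def pvGoA (text : String) (fuel : Nat) (start : Nat) : List String :=
  match fuel with
  | 0 => []
  | fuel + 1 =>
    let f := PySem.Str.findFrom text "img src=\"" (start : Int)
    if f = -1 then []
    else
      let s2 := f.toNat + 9
      let e := PySem.Str.findFrom text "\"" (s2 : Int)
      if e = -1 then []
      else PySem.Str.slice text (some (s2 : Int)) (some e) :: pvGoA text fuel e.toNat

def get_pictures_urls (text : String) : List String :=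
  pvGoA text (text.length + 1) 0

-- ===== PORT B =====
-- Source B is `re.findall(r'img src="([^"]*)"', text)`. PySem has no regex, so findall is ported by
-- hand, step for step, as the leftmost non-overlapping scan the regex engine performs for this
-- pattern: at each position try the literal 'img src="', capture [^"]* (the longest run of
-- non-quote characters), demand the closing '"', resume right after it; on any failure advance
-- one character. This is exact for this pattern (literal, negated-class star, literal: the
-- [^"]* match is forced maximal and no cross-match backtracking can occur).
def pvTag : List Char := "img src=\"".toList

def pvScanB : List Char → List String
  | [] => []
  | c :: cs =>
    if pvTag <+: (c :: cs) then
      let afterTag := (c :: cs).drop 9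
      let url := afterTag.takeWhile (· ≠ '"')
      let rest := afterTag.dropWhile (· ≠ '"')
      if rest.isEmpty then pvScanB cs
      else String.ofList url :: pvScanB rest.tail
    else pvScanB cs
termination_by l => l.length
decreasing_by
  · simp [List.length_cons]
  · have h1 : (((c :: cs).drop 9).dropWhile (· ≠ '"')).length ≤ ((c :: cs).drop 9).length :=
      List.length_dropWhile_le _ _
    have h2 : ((c :: cs).drop 9).length ≤ cs.length := by
      simp [List.length_drop]
    simp only [List.length_tail, List.length_cons]
    omega
  · simp [List.length_cons]

def get_pictures_urls_alt (text : String) : List String :=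
  pvScanB text.toList

-- ===== PRECONDITION & SPEC =====
def Spec_get_pictures_urls (text : String) (out : List String) : Prop := out = get_pictures_urls_alt text
instance (text : String) (out : List String) : Decidable (Spec_get_pictures_urls text out) := by unfold Spec_get_pictures_urls; infer_instance

-- ===== CLAIM (what is proved, stated in full; the proofs are below) =====
def Claim_equal_get_pictures_urls : Prop := ∀ (text : String), Dom_get_pictures_urls text → Spec_get_pictures_urls text (get_pictures_urls text)

-- ===== LEMMAS AND PROOFS =====

theorem pvSingleton_prefix_iff (a : Char) (xs : List Char) : [a] <+: xs ↔ xs.head? = some a := by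
  cases xs with
  | nil => simp
  | cons c cs => simp [List.cons_prefix_cons, eq_comm]

theorem pvScanB_not_prefix (c : Char) (cs : List Char) (h : ¬ pvTag <+: (c :: cs)) :
    pvScanB (c :: cs) = pvScanB cs := by
  rw [pvScanB, if_neg h]

theorem pvScanB_cons_pos (c : Char) (cs : List Char) (h : pvTag <+: (c :: cs)) :
    pvScanB (c :: cs) =
      if (((c :: cs).drop 9).dropWhile (· ≠ '"')).isEmpty then pvScanB cs
      else String.ofList (((c :: cs).drop 9).takeWhile (· ≠ '"')) ::
        pvScanB ((((c :: cs).drop 9).dropWhile (· ≠ '"')).tail) := by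
  rw [pvScanB, if_pos h]

theorem pvScanB_nil_of_not_infix (m : List Char) (h : ¬ pvTag <:+: m) : pvScanB m = [] := by
  induction m with
  | nil => rw [pvScanB]
  | cons c cs ih =>
    rw [pvScanB_not_prefix c cs (fun hp => h (List.infix_cons_iff.2 (Or.inl hp)))]
    exact ih (fun hi => h (List.infix_cons_iff.2 (Or.inr hi)))

theorem pvScanB_skip (n : Nat) (m : List Char) (h : ∀ i < n, ¬ pvTag <+: m.drop i) :
    pvScanB m = pvScanB (m.drop n) := by
  induction n generalizing m with
  | zero => simp
  | succ n ih =>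
    cases m with
    | nil => simp
    | cons c cs =>
      rw [pvScanB_not_prefix c cs (by simpa using h 0 (Nat.succ_pos n))]
      rw [ih cs (fun i hi => by simpa using h (i + 1) (by omega))]
      simp

theorem pvTakeDropWhile_eq (m : List Char) (q : Nat) (hq : m[q]? = some '"')
    (hlt : ∀ j < q, m[j]? ≠ some '"') :
    m.takeWhile (· ≠ '"') = m.take q ∧ m.dropWhile (· ≠ '"') = m.drop q := by
  induction m generalizing q with
  | nil => simp at hq
  | cons c cs ih =>
    cases q with
    | zero =>
      simp at hq
      subst hq
      simp [List.takeWhile, List.dropWhile]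
    | succ q =>
      have hc : c ≠ '"' := by
        intro hcq
        exact hlt 0 (Nat.succ_pos q) (by simp [hcq])
      have h := ih q (by simpa using hq) (fun j hj => by simpa using hlt (j + 1) (by omega))
      rw [List.takeWhile_cons_of_pos (by simp [hc]), List.dropWhile_cons_of_pos (by simp [hc]),
        List.take_succ_cons, List.drop_succ_cons]
      exact ⟨by rw [h.1], h.2⟩

theorem pvQuote_mem_of_tag_infix (cs : List Char) (h : pvTag <:+: cs) : '"' ∈ cs.drop 8 := by
  obtain ⟨u, v, huv⟩ := h
  have hget : cs[u.length + 8]? = some '"' := by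
    rw [← huv, List.append_assoc, List.getElem?_append_right (by omega)]
    simp [pvTag]
  have hmem : (cs.drop 8)[u.length]? = some '"' := by
    rw [List.getElem?_drop, show 8 + u.length = u.length + 8 by omega]
    exact hget
  exact List.mem_of_getElem? hmem

theorem pvGoA_eq (text : String) (fuel start : Nat)
    (hs : start ≤ text.toList.length) (hf : text.toList.length + 1 ≤ fuel + start) :
    pvGoA text fuel start = pvScanB (text.toList.drop start) := by
  induction fuel generalizing start with
  | zero => omega
  | succ fuel ih =>
    rw [pvGoA]
    simp only [PySem.Str.findFrom_eq]
    rw [show ("img src=\"" : String).toList = pvTag from rfl,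
        show ("\"" : String).toList = ['"'] from rfl]
    set l := text.toList with hl
    by_cases h1 : PySem.Chars.findFrom l pvTag (start : Int) = -1
    · rw [if_pos h1]
      have hni : ¬ pvTag <:+: l.drop start :=
        (PySem.Chars.findFrom_natCast_eq_neg_one_iff l pvTag start hs).1 h1
      exact (pvScanB_nil_of_not_infix _ hni).symm
    · rw [if_neg h1]
      obtain ⟨hge, hpre, hmin⟩ := PySem.Chars.findFrom_natCast_spec l pvTag start hs h1
      set fI := PySem.Chars.findFrom l pvTag (start : Int) with hfI
      set n := fI.toNat with hn
      have hstart_n : start ≤ n := by omega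
      have hlen9 : n + 9 ≤ l.length := by
        have hle := hpre.length_le
        simp only [List.length_drop] at hle
        have : pvTag.length = 9 := rfl
        omega
      -- skip B's scan up to position n, the first tag occurrence
      have hskip : pvScanB (l.drop start) = pvScanB (l.drop n) := by
        rw [pvScanB_skip (n - start) (l.drop start)
          (fun i hi => by
            rw [List.drop_drop]
            exact hmin (start + i) (by omega) (by omega))]
        rw [List.drop_drop, Nat.add_sub_cancel' hstart_n]
      rw [hskip]
      obtain ⟨c, cs, hcons⟩ : ∃ c cs, l.drop n = c :: cs := by
        cases hdn : l.drop n with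
        | nil =>
          rw [hdn] at hpre
          simp [pvTag] at hpre
        | cons c cs => exact ⟨c, cs, rfl⟩
      have hafter : (c :: cs).drop 9 = l.drop (n + 9) := by
        rw [← hcons, List.drop_drop]
      by_cases h2 : PySem.Chars.findFrom l ['"'] ((n + 9 : Nat) : Int) = -1
      · -- no closing quote: A breaks with []; B's scan finds no further match either
        rw [if_pos h2]
        have hni : ¬ ['"'] <:+: l.drop (n + 9) :=
          (PySem.Chars.findFrom_natCast_eq_neg_one_iff l ['"'] (n + 9) hlen9).1 h2
        have hnomem : '"' ∉ l.drop (n + 9) := by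
          intro hm
          obtain ⟨s, t, hst⟩ := List.append_of_mem hm
          exact hni ⟨s, t, by rw [hst]; simp⟩
        rw [hcons, pvScanB_cons_pos c cs (hcons ▸ hpre)]
        rw [if_pos (by
          rw [hafter, List.isEmpty_iff, List.dropWhile_eq_nil_iff]
          intro x hx
          simp only [decide_eq_true_eq, ne_eq]
          intro hxq
          exact hnomem (hxq ▸ hx))]
        refine (pvScanB_nil_of_not_infix cs (fun hinf => ?_)).symm
        have : '"' ∈ cs.drop 8 := pvQuote_mem_of_tag_infix cs hinf
        rw [show cs.drop 8 = (c :: cs).drop 9 from rfl, hafter] at this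
        exact hnomem this
      · -- closing quote found at q'
        rw [if_neg h2]
        obtain ⟨hge2, hpre2, hmin2⟩ :=
          PySem.Chars.findFrom_natCast_spec l ['"'] (n + 9) hlen9 h2
        set eI := PySem.Chars.findFrom l ['"'] ((n + 9 : Nat) : Int) with heI
        set q' := eI.toNat with hq'
        have hs2q : n + 9 ≤ q' := by omega
        have hhead : l[q']? = some '"' := by
          rw [← List.head?_drop]
          exact (pvSingleton_prefix_iff '"' (l.drop q')).1 hpre2
        have hq'lt : q' < l.length := (List.getElem?_eq_some_iff.1 hhead).1
        -- the closing quote is at index q' - (n+9) of the text after the tag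
        set q := q' - (n + 9) with hq
        have hat : (l.drop (n + 9))[q]? = some '"' := by
          rw [List.getElem?_drop, show n + 9 + q = q' by omega]
          exact hhead
        have hbefore : ∀ j < q, (l.drop (n + 9))[j]? ≠ some '"' := by
          intro j hj hjq
          refine hmin2 (n + 9 + j) (by omega) (by omega) ?_
          rw [pvSingleton_prefix_iff, List.head?_drop]
          rw [List.getElem?_drop] at hjq
          exact hjq
        obtain ⟨htake, hdrop⟩ := pvTakeDropWhile_eq (l.drop (n + 9)) q hat hbefore
        rw [hcons, pvScanB_cons_pos c cs (hcons ▸ hpre), hafter, htake, hdrop]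
        have hrestdrop : (l.drop (n + 9)).drop q = l.drop q' := by
          rw [List.drop_drop, show n + 9 + q = q' by omega]
        obtain ⟨t, ht⟩ : ∃ t, l.drop q' = '"' :: t := by
          cases hdq : l.drop q' with
          | nil => rw [← List.head?_drop, hdq] at hhead; simp at hhead
          | cons d t =>
            rw [← List.head?_drop, hdq] at hhead
            simp at hhead
            exact ⟨t, by rw [hhead]⟩
        rw [if_neg (by rw [hrestdrop, ht]; simp)]
        congr 1
        · -- heads: A's slice equals B's captured run
          rw [← String.toList_inj, PySem.Str.toList_slice, PySem.Chars.slice_eq_listSlice]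
          rw [PySem.List.slice_toNat _ (by omega) (by omega)]
          rw [String.toList_ofList, ← hl]
          simp only [Int.toNat_natCast]
          rw [← hq', hq]
        · -- tails: A continues at the quote, where no tag can start; B continues after it
          rw [ih q' (by omega) (by omega), hrestdrop, ht, List.tail_cons]
          exact pvScanB_not_prefix '"' t (by
            intro hp
            rw [show pvTag = ['i','m','g',' ','s','r','c','=','"'] from by decide] at hp
            have := (List.cons_prefix_cons.1 hp).1
            simp at this)

-- ===== VERDICT (by name: the statement is the Claim_ definition above) =====
theorem get_pictures_urls_spec : Claim_equal_get_pictures_urls := by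
  intro text _
  unfold Spec_get_pictures_urls get_pictures_urls get_pictures_urls_alt
  rw [pvGoA_eq text (text.length + 1) 0 (by omega) (by simp)]
  simp
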